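/- GENERATED by mk_final_copies.py from the proof of the farm's unit `start_decoder.R16d` (farm:start_decoder.R16d.1: Lemmas.lean) as the
   re-elaboration sweep compiled it — do not edit. -/
/-
  LEMMAS OF UNIT `start_decoder.R16d` (0x1166f6 – 0x116776: `f->finalY[i] = rax`, the joint NULL test, `error` ∨ `memset`).
  All but `err_jmp` is PURE LOGIC over abstract states (no machine step): the walk of Proof.lean hands each returned callee
  state to one of these lemmas.

      OwnWins g i                  the segment's own footprint up to a callee's entry: the pushed return addresses, the slot `finalY[i]`
      loop_carry2                  `ChanLoop` over the own footprint followed by a callee's footprint (one `ChanLoop.carry`)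
      chk_f                        a check site at a constant offset inside `*f`
      error_pre, memset_pre        the preconditions of the two callees
      rdx_val                      `movsxd rdx, [f + 9CH] ; shl rdx, 2` = `4 · blocksize_1`
      err_loop                     the loop assertion at the return of `error` (0x116752)
      ok_exit                      the exit assertion `AtR16d` at the return of `memset` (0x11677b)
      err_jmp                      the ONE machine step of this file: 0x116752 `jmp 113b22`, from `err_loop`'s assertion to `AtERR`
-/
import Asan.CheckWalk
import Vorbis.Spec.Reader
import Vorbis.Spec.Units.start_decoder_R16d

open X86 X86.User Asan Vorbis Vorbis.Spec Vorbis.Spec.StartDecoder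

set_option maxRecDepth 4000
set_option maxHeartbeats 4000000

namespace Vorbis.Spec.start_decoder_R16d

/-- **The segment's own footprint up to the entry of a callee**: the return addresses pushed below the steady rsp, and the pointer
slot `f->finalY[i]` (`f + 1264 + 8·i`, stored at 0x11670a). -/
def OwnWins (g : Ghost) (i : Nat) : List Span :=
  [⟨g.R - 8, g.R⟩, ⟨g.f + 1264 + 8 * i, g.f + 1272 + 8 * i⟩]

/-- Both windows of the own footprint are windows of iteration `i` of the channel loop (arms 1 and 9 of `ChanWin`). -/
theorem ownWins_chan {g : Ghost} {i : Nat} {A9 : Arena} {A : Arena × List Obj} (hi : i < 16) :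
    ∀ x, x ∈ OwnWins g i → ChanWin g i A9 A x := by
  intro x hx
  simp only [OwnWins, List.mem_cons, List.mem_nil_iff, or_false] at hx
  unfold ChanWin
  rcases hx with rfl | rfl
  · left
    simp only []
    omega
  · right; right; right; right; right; right; right; right; left
    simp only []
    omega

/-- **`ChanLoop` over the own footprint followed by a callee's footprint** `ws` (every window a `ChanWin`, and one that `bits_kept`
accepts): the loop assertion at the returned state `w`, the joint footprint, and that each of its windows is a `ChanWin` (for
`ChanWin.fields_same` and the slots of channel `i`). -/
theorem loop_carry2 {u₀ : State} {g : Ghost} {pc pc' : Word} {i : Nat} {A9 : Arena} {A : Arena × List Obj} {v s w : State}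
    {ws : List Span} (hl : ChanLoop u₀ g pc i A9 A v) (hi : i < 16)
    (hsA : Mem.SameExcept (OwnWins g i) v.mem s.mem) (hunA : ShadowUntouched v.mem s.mem)
    (hsB : Mem.SameExcept ws s.mem w.mem) (hunB : ShadowUntouched s.mem w.mem)
    (hws : ∀ x, x ∈ ws → ChanWin g i A9 A x)
    (hwb : ∀ x, x ∈ ws → (g.R - 408 ≤ x.lo ∧ x.hi ≤ g.R + 0x598) ∨ (A.1.B ≤ x.lo ∧ x.hi ≤ A.1.B + A.1.L) ∨
      (g.f + 72 ≤ x.lo ∧ x.hi ≤ g.f + 1488) ∨ (g.f ≤ x.lo ∧ x.hi ≤ g.f + 48) ∨ 0xC00000 ≤ x.lo)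
    (hrip : w.rip = pc') (hrsp : w.reg .rsp = addr g.R) (hcode : CodeOK u₀ w.mem) (hinv : abiInv w)
    (hrbp : w.reg .rbp = v.reg .rbp) (hr14 : w.reg .r14 = v.reg .r14) :
    ChanLoop u₀ g pc' i A9 A w ∧ Mem.SameExcept (OwnWins g i ++ ws) v.mem w.mem ∧
      ∀ x, x ∈ OwnWins g i ++ ws → ChanWin g i A9 A x := by
  have hp : Pos g A := hl.secPt.pos
  have hs : Mem.SameExcept (OwnWins g i ++ ws) v.mem w.mem := by
    refine Mem.SameExcept.trans (hsA.mono ?_) (hsB.mono ?_)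
    · intro x hx a h1 h2
      exact ⟨x, List.mem_append_left _ hx, h1, h2⟩
    · intro x hx a h1 h2
      exact ⟨x, List.mem_append_right _ hx, h1, h2⟩
  have hun : ShadowUntouched v.mem w.mem := Mem.EqOn.trans hunA hunB
  have hall : ∀ x, x ∈ OwnWins g i ++ ws → ChanWin g i A9 A x := by
    intro x hx
    rcases List.mem_append.mp hx with h1 | h2
    · exact ownWins_chan hi x h1
    · exact hws x h2
  have hbits : Bits (g.Blk A) g.len w.mem g.f := by
    apply bits_kept hp hl.mid.bits hs
    intro x hx
    rcases List.mem_append.mp hx with h1 | h2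
    · have hra := hp.ra_lo
      have hre := hp.r_eq
      simp only [OwnWins, List.mem_cons, List.mem_nil_iff, or_false] at h1
      rcases h1 with rfl | rfl
      · left
        simp only []
        omega
      · right; right; left
        simp only []
        omega
    · exact hwb x h2
  exact ⟨hl.carry hs hun hall hbits hrip hrsp hcode hinv hrbp hr14, hs, hall⟩

/-- **A check site at a constant offset inside `*f`** (0x116705 `finalY[i]`, 0x116712 `channel_buffers[i]`, 0x116733
`previous_window[i]`, 0x11675e `blocksize_1`): `*f` is one live object, no store of the segment went to the shadow. -/
theorem chk_f {u₀ : State} {g : Ghost} {pc : Word} {A : Arena × List Obj} {v : State} {m : Mem}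
    (hfr : Frame u₀ g pc A v) (hh : g.Hand A) (hun : ShadowUntouched v.mem m) (off k : Nat) (hk : 1 ≤ k)
    (hoff : off + k ≤ 1808) (hf : g.f + 1808 < 2 ^ 64) : AccSmall k m (addr (g.f + off)) := by
  have ea : (addr (g.f + off)).toNat = g.f + off := toNat_addr _ (by omega)
  refine (hh.obj.mono (frames'_sub g A.2)).accSmall hfr.shadow hun _ k hk ?_ ?_
  · rw [ea]
    omega
  · rw [ea]
    simp only [Off.sizeof.stb_vorbis]
    omega

/-- **The precondition of `error(f, 3)`** at its entry state `s` (0x11674d): the shadow layer of a call from the steady frame, `*f`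
one live object. -/
theorem error_pre {u₀ : State} {g : Ghost} {pc : Word} {A : Arena × List Obj} {v s : State}
    (hfr : Frame u₀ g pc A v) (hh : g.Hand A) (hun : ShadowUntouched v.mem s.mem)
    (hsp : (s.reg .rsp).toNat + 8 = g.R) (hrdi : (s.reg .rdi).toNat = g.f) :
    (error.spec A.2 g.frames').pre s := by
  refine ⟨shadowPre_call hfr hsp hun, ?_⟩
  rw [hrdi]
  exact hh.obj.mono (frames'_sub g A.2)

/-- **The precondition of `memset(channel_buffers[i], 0, 4·blocksize_1)`** at its entry state `s` (0x116776): the pointer passed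
the NULL test, so it is a block of `4·b1` bytes allocated since `A9`, one live object (AR6). -/
theorem memset_pre {u₀ : State} {g : Ghost} {i : Nat} {A9 : Arena} {A : Arena × List Obj} {v s : State}
    (hb : BodyR16c u₀ g i A9 A v) (hun : ShadowUntouched v.mem s.mem) (hsp : (s.reg .rsp).toNat + 8 = g.R)
    (hrdi : (s.reg .rdi).toNat = stb_vorbis.channel_buffers v.mem g.f i)
    (hrdx : (s.reg .rdx).toNat = 4 * bsize v.mem g.f 1) (hcb : stb_vorbis.channel_buffers v.mem g.f i ≠ 0) :
    (memset.spec A.2 g.frames').pre s := by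
  have hsince : Since A9 A.1 ⟨stb_vorbis.channel_buffers v.mem g.f i, 4 * bsize v.mem g.f 1⟩ := hb.cb.resolve_left hcb
  refine ⟨shadowPre_call hb.loop.frame hsp hun, Or.inr ?_⟩
  rw [hrdi, hrdx]
  exact liveIn_of_arenaBlk hb.loop.mid.arena hsince.1

/-- **`movsxd rdx, dword [f + 9CH] ; shl rdx, 2`** is `4 · blocksize_1` (HD3: `64 ≤ blocksize_1 ≤ 8192`, nothing wraps). -/
theorem rdx_val {mem : Mem} {f : Nat} (hhdr : HeaderOK mem f) :
    (Word.ofBV (BitVec.signExtend 64 (BitVec.ofNat 32 (mem.readLE (addr f + 156) 4))) <<< 2).toNat = 4 * bsize mem f 1 := by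
  obtain ⟨hb0, hb01, hb1⟩ := hhdr.HD3.range
  have hraw : stb_vorbis.blocksize_1 mem f = sint32 (mem.readLE (addr f + 156) 4) := by
    simp only [vacc, voff]
    rw [Mem.i32_def]
    unfold Mem.u32
    rw [← addr_add_lit]
  have hrlt := Mem.readLE_lt' mem (addr f + 156) 4
  have hcases := sint32_cases (mem.readLE (addr f + 156) 4)
  have hbs : bsize mem f 1 = mem.readLE (addr f + 156) 4 := by
    rw [bsize_one, hraw]
    omega
  have hbs_hi : mem.readLE (addr f + 156) 4 ≤ 8192 := by
    rw [hraw] at hb1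
    omega
  have e2 : (2 : UInt64).toNat % 64 = 2 := by decide
  rw [cnt32_sext_bv _ (by omega), UInt64.toNat_shiftLeft, UInt64.toNat_ofNat', e2, Nat.shiftLeft_eq, hbs]
  omega

/-- **The loop assertion at the return of `error(f, 3)`** (0x116752): the own footprint up to the call, then `error`'s (its frame,
`[f + 140, f + 144)`: arms 1 and 6 of `ChanWin`). -/
theorem err_loop {u₀ : State} {g : Ghost} {i : Nat} {A9 : Arena} {A : Arena × List Obj} {v s sr : State}
    (hb : BodyR16c u₀ g i A9 A v) (hi : i < 16)
    (hsA : Mem.SameExcept (OwnWins g i) v.mem s.mem) (hunA : ShadowUntouched v.mem s.mem)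
    (hsp : (s.reg .rsp).toNat = g.R - 8) (hrdi : (s.reg .rdi).toNat = g.f)
    (hsame : Mem.SameExcept ((error.spec A.2 g.frames').footprint s) s.mem sr.mem)
    (hpost : (error.spec A.2 g.frames').post s sr)
    (hrip : sr.rip = Vorbis.L.start_decoder.cut323) (hrsp : sr.reg .rsp = addr g.R) (hcode : CodeOK u₀ sr.mem)
    (hinv : abiInv sr) (hrbp : sr.reg .rbp = v.reg .rbp) (hr14 : sr.reg .r14 = v.reg .r14) :
    ChanLoop u₀ g Vorbis.L.start_decoder.cut323 i A9 A sr := by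
  have hp : Pos g A := hb.loop.secPt.pos
  have hra := hp.ra_lo
  have hre := hp.r_eq
  have hsB := hsame
  simp only [X86.User.Spec.footprint, vspec] at hsB
  rw [hrdi, hsp] at hsB
  have hunB : ShadowUntouched s.mem sr.mem := hpost.2.1
  refine (loop_carry2 hb.loop hi hsA hunA hsB hunB ?_ ?_ hrip hrsp hcode hinv hrbp hr14).1
  · intro x hx
    simp only [List.mem_cons, List.mem_nil_iff, or_false] at hx
    unfold ChanWin
    rcases hx with rfl | rfl
    · left
      simp only []
      omega
    · right; right; right; right; right; left
      simp only []
      omega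
  · intro x hx
    simp only [List.mem_cons, List.mem_nil_iff, or_false] at hx
    rcases hx with rfl | rfl
    · left
      simp only []
      omega
    · right; right; left
      simp only []
      omega

/-- **The exit assertion `AtR16d` at the return of `memset(channel_buffers[i], 0, 4·blocksize_1)`** (0x11677b = cut324): the three
pointers of channel `i` passed the NULL test, so the three `PendR16` are blocks allocated since `A9`; memset's footprint (its frame,
the block `channel_buffers[i]`: a YOUNG window) is carried by `loop_carry2`; the slots `channel_buffers[i]`, `previous_window[i]`
are off every window, `finalY[i]` holds the pointer stored at 0x11670a (`hfy0`, read at memset's entry state): CH(i + 1) by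
`ChanUpTo.step` / `FYUpTo.step`. -/
theorem ok_exit {u₀ : State} {g : Ghost} {i : Nat} {A9 : Arena} {A : Arena × List Obj} {v s sr : State}
    (hb : BodyR16c u₀ g i A9 A v) (hi : i < 16)
    (hsA : Mem.SameExcept (OwnWins g i) v.mem s.mem) (hunA : ShadowUntouched v.mem s.mem)
    (hfy0 : s.mem.readLE (addr (g.f + 1264 + 8 * i)) 8 = (v.reg .rax).toNat)
    (hsp : (s.reg .rsp).toNat = g.R - 8)
    (hrdi : (s.reg .rdi).toNat = stb_vorbis.channel_buffers v.mem g.f i)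
    (hrdx : (s.reg .rdx).toNat = 4 * bsize v.mem g.f 1)
    (hcb : stb_vorbis.channel_buffers v.mem g.f i ≠ 0) (hpw : stb_vorbis.previous_window v.mem g.f i ≠ 0)
    (hrax : (v.reg .rax).toNat ≠ 0)
    (hsame : Mem.SameExcept ((memset.spec A.2 g.frames').footprint s) s.mem sr.mem)
    (hpost : (memset.spec A.2 g.frames').post s sr)
    (hrip : sr.rip = Vorbis.L.start_decoder.cut324) (hrsp : sr.reg .rsp = addr g.R) (hcode : CodeOK u₀ sr.mem)
    (hinv : abiInv sr) (hrbp : sr.reg .rbp = v.reg .rbp) (hr14 : sr.reg .r14 = v.reg .r14) :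
    AtR16d u₀ g i sr := by
  have hl := hb.loop
  have hm := hl.mid
  have hp : Pos g A := hl.secPt.pos
  have hra := hp.ra_lo
  have hre := hp.r_eq
  have hrh := hp.ra_hi
  have hflo := hp.f_lo
  have hfhi := hp.f_hi
  have hfst := hp.f_stack
  have hout := hp.objOut
  simp only [Ghost.RA] at hfst hra hre hrh
  have hcbS : Since A9 A.1 ⟨stb_vorbis.channel_buffers v.mem g.f i, 4 * bsize v.mem g.f 1⟩ := hb.cb.resolve_left hcb
  have hpwS : Since A9 A.1 ⟨stb_vorbis.previous_window v.mem g.f i, 2 * bsize v.mem g.f 1⟩ := hb.pw.resolve_left hpw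
  have hfyS : Since A9 A.1 ⟨(v.reg .rax).toNat, 2 * (v.mem.i32 (g.R + 0x28)).toNat⟩ := hb.p3.resolve_left hrax
  have hin := arena_inside hm.arena hcbS.1
  simp only [] at hin
  -- memset's footprint: its frame, the block `channel_buffers[i]`
  have hsB := hsame
  simp only [X86.User.Spec.footprint, vspec] at hsB
  rw [hrdi, hrdx, hsp] at hsB
  have hunB : ShadowUntouched s.mem sr.mem := hpost.2.1
  -- both windows are windows of iteration `i`: the callee's frame (arm 1), a window in a block allocated since `A9` (`Young`)
  have hwsB : ∀ x, x ∈ [(⟨g.R - 8 - 64, g.R - 8⟩ : Span),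
      ⟨stb_vorbis.channel_buffers v.mem g.f i, stb_vorbis.channel_buffers v.mem g.f i + 4 * bsize v.mem g.f 1⟩] →
      ChanWin g i A9 A x := by
    intro x hx
    simp only [List.mem_cons, List.mem_nil_iff, or_false] at hx
    unfold ChanWin
    rcases hx with rfl | rfl
    · left
      simp only []
      omega
    · right; right; right; right; right; right; right; right; right; right; right; right
      exact Young.of_since hm.arena hm.extc hcbS ⟨Nat.le_refl _, Nat.le_refl _⟩
  -- … and neither meets a field of the bit reader (`bits_kept`: the own stack; the arena's buffer)
  have hwbB : ∀ x, x ∈ [(⟨g.R - 8 - 64, g.R - 8⟩ : Span),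
      ⟨stb_vorbis.channel_buffers v.mem g.f i, stb_vorbis.channel_buffers v.mem g.f i + 4 * bsize v.mem g.f 1⟩] →
      (g.R - 408 ≤ x.lo ∧ x.hi ≤ g.R + 0x598) ∨ (A.1.B ≤ x.lo ∧ x.hi ≤ A.1.B + A.1.L) ∨
        (g.f + 72 ≤ x.lo ∧ x.hi ≤ g.f + 1488) ∨ (g.f ≤ x.lo ∧ x.hi ≤ g.f + 48) ∨ 0xC00000 ≤ x.lo := by
    intro x hx
    simp only [List.mem_cons, List.mem_nil_iff, or_false] at hx
    rcases hx with rfl | rfl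
    · left
      simp only []
      omega
    · right; left
      simp only []
      omega
  obtain ⟨hloop, hs, hall⟩ :=
    loop_carry2 (pc' := Vorbis.L.start_decoder.cut324) hl hi hsA hunA hsB hunB hwsB hwbB hrip hrsp hcode hinv hrbp hr14
  obtain ⟨e1, e2, e3, e4, e5, e6, e7⟩ := ChanWin.fields_same hp (by omega) hs (fun x hx => Or.inl (hall x hx))
  have eb : bsize sr.mem g.f 1 = bsize v.mem g.f 1 := by
    rw [bsize_one, bsize_one, e2]
  -- the slots of channel `i`: `channel_buffers[i]`, `previous_window[i]` are off every window
  have Ecb : Mem.EqOn (g.f + 872 + 8 * i) (g.f + 880 + 8 * i) v.mem sr.mem := by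
    apply hs.eqOn
    intro x hx
    simp only [OwnWins, List.cons_append, List.nil_append, List.mem_cons, List.mem_nil_iff, or_false] at hx
    rcases hx with rfl | rfl | rfl | rfl <;> simp only [] <;> omega
  have Epw : Mem.EqOn (g.f + 1128 + 8 * i) (g.f + 1136 + 8 * i) v.mem sr.mem := by
    apply hs.eqOn
    intro x hx
    simp only [OwnWins, List.cons_append, List.nil_append, List.mem_cons, List.mem_nil_iff, or_false] at hx
    rcases hx with rfl | rfl | rfl | rfl <;> simp only [] <;> omega
  have hcb' : stb_vorbis.channel_buffers sr.mem g.f i = stb_vorbis.channel_buffers v.mem g.f i := by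
    simp only [vacc, voff]
    exact Ecb.ptr _ (by omega) (by omega) (by omega)
  have hpw' : stb_vorbis.previous_window sr.mem g.f i = stb_vorbis.previous_window v.mem g.f i := by
    simp only [vacc, voff]
    exact Epw.ptr _ (by omega) (by omega) (by omega)
  -- `finalY[i]` holds the pointer stored at 0x11670a: memset's windows miss the slot
  have ea : (addr (g.f + 1264 + 8 * i)).toNat = g.f + 1264 + 8 * i := toNat_addr _ (by omega)
  have hfy' : stb_vorbis.finalY sr.mem g.f i = (v.reg .rax).toNat := by
    simp only [vacc, voff]
    unfold Mem.u64
    rw [← hfy0]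
    apply hsB.readLE (addr (g.f + 1264 + 8 * i)) 8 (by omega)
    intro x hx
    simp only [List.mem_cons, List.mem_nil_iff, or_false] at hx
    rcases hx with rfl | rfl <;> simp only [] <;> rw [ea] <;> omega
  refine ⟨A9, A, hloop.secPt, hloop.r14, ?_, hloop.prev0, ?_, ?_⟩
  · rw [e1]
    exact hb.lt
  · refine hl.chan.step e5 e6 e2 (fun _ hB => hB) ⟨?_, ?_⟩
    · rw [hcb', eb]
      exact hcbS
    · rw [hpw', eb]
      exact hpwS
  · refine hloop.fy.step ?_
    rw [hfy', e4]
    exact hfyS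

/-- **From the return of `error(f, 3)` to the epilogue** (0x116752 `jmp 113b22`): one instruction, no memory change; `AtERR` with
eax = 0 and `Failed` by `Mid.failed_late` (every H-clause is a finished group since SD.8). -/
theorem err_jmp {Lay : Layout} (hLay : Lay.hi = 0x1000000) {μ : Microarch} (hμ : UserX.MicroOK μ) {u₀ : State}
    (hcode : HasCodeNat Lay u₀ Vorbis.L.start_decoder.entry Vorbis.Code.code_start_decoder.nat Vorbis.L.start_decoder.size)
    {g : Ghost} {i : Nat} {A9 : Arena} {A : Arena × List Obj} {v : State}
    (hl : ChanLoop u₀ g Vorbis.L.start_decoder.cut323 i A9 A v) (hrax : v.reg .rax = 0) :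
    ReachVia Lay μ WayInv v (fun w => AtR16d u₀ g i w ∨ AtERR u₀ g w) := by
  have hpt := hl.secPt
  have hfr := hpt.frame
  have hh := hpt.hand
  have hm := hpt.mid
  have hp : Pos g A := hpt.pos
  have he := hfr.entry
  v_entry he
  obtain ⟨hRa, hR8⟩ := hfr.r_eq
  simp only [steady, Ghost.RA] at hRa
  simp only [depth] at he_room he_stack
  have hRn : (addr g.R).toNat = g.R := toNat_addr _ (by omega)
  have w_rip := hfr.rip
  have c_rsp := hfr.rsp
  have c_rax := hrax
  have w_kept : RegsKept [.rsp] v v := RegsKept.refl _ _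
  have w_eq : Mem.EqOn Vorbis.L.textLo Vorbis.L.textHi u₀.mem v.mem := hfr.code
  have hdf : v.flags .df = false := (show abiInv _ from hfr.inv).1
  have hmx : v.mxcsr &&& 0x1F80 = 0x1F80 := (show abiInv _ from hfr.inv).2
  have hsse := Vorbis.sseOK_of_abiInv hfr.inv
  u_walk hcode [hμ.vendor] until [Vorbis.L.start_decoder.cut4] span [Vorbis.L.textLo, Vorbis.L.textHi] side (v_side)
  -- 0x113b22: the memory is that of the returned state of `error`, eax = 0
  have habi : abiInv s_116752 := by
    refine Vorbis.abiInv_of ?_ ?_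
    · rw [w_flags]
      exact hdf
    · rw [w_mxcsr]
      exact hmx
  have hfE : FInv g A s_116752.mem := by
    rw [w_mem]
    exact FInv.of hfr
  have hfrE : Frame u₀ g pc_ERR A s_116752 := hfE.frame hfr w_rip w_rsp w_eq habi hfr.offText hfr.ext
  have hfailedE : Failed g.len g.f (g.Live A) A s_116752.mem := by
    rw [w_mem]
    exact hm.failed_late (by omega)
  refine ReachVia.done (Or.inr ⟨A, hfrE, hh, Or.inl ⟨?_, hfailedE⟩⟩)
  rw [w_kept.get .rax rfl, hrax]
  rfl

end Vorbis.Spec.start_decoder_R16d
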